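-- pv_equiv track=rewrite | github.com/micchyboy237/jet_windows_workspace | python_scripts/extraction/sentence_extractor.py | group_by_empty_split
-- ===== SOURCE A (Python) =====
-- def group_by_empty_split(segments: list[str]) -> list[list[str]]:
--     paragraphs, current = [], []
--     for seg in segments:
--         if seg.strip():
--             current.append(seg)
--         else:
--             if current:
--                 paragraphs.append(current)
--                 current = []
--     if current:
--         paragraphs.append(current)
--     return paragraphs
-- ===== SOURCE B (Python) =====
-- def group_by_empty_split(segments: list[str]) -> list[list[str]]:
--     # groupby-style: build maximal runs keyed by whether the segment has text,
--     # then keep only the text runs.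
--     runs = []  # list of (key, run): maximal consecutive runs of equal bool(seg.strip())
--     for seg in segments:
--         k = bool(seg.strip())
--         if runs and runs[-1][0] == k:
--             runs[-1][1].append(seg)
--         else:
--             runs.append((k, [seg]))
--     return [run for k, run in runs if k]
-- ===== Notes on version B (the rewrite author's own statement) =====
-- stated objective: alternative
-- what changed: B does run-length grouping by the key bool(seg.strip()) (itertools.groupby style, materialising blank runs too) and then filters the text-keyed runs, instead of A's flush-current-on-blank accumulator.
import Mathlib
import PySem

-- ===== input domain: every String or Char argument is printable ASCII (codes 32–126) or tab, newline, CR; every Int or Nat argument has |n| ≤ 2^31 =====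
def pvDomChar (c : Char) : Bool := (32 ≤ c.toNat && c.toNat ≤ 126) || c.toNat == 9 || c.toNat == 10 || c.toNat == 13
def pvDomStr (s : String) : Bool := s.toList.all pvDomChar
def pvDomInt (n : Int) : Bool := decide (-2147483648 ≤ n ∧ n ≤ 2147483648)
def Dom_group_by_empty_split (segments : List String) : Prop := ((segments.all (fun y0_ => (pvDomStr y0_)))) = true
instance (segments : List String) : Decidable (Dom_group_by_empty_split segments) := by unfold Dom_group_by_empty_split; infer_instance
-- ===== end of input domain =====

-- B replaces A's flush-on-blank accumulator by groupby-style run building (key = segment has text) followed by filtering the text runs; alternative decomposition, same cost.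


-- ===== PORT A =====
-- the for-loop with state (paragraphs, current); the [] case is the code after the loop
def pyAloop : List String → List (List String) → List String → List (List String)
  | [], paragraphs, current =>
      if current ≠ [] then paragraphs ++ [current] else paragraphs
  | seg :: rest, paragraphs, current =>
      if PySem.Str.strip seg ≠ "" then pyAloop rest paragraphs (current ++ [seg])
      else if current ≠ [] then pyAloop rest (paragraphs ++ [current]) []
      else pyAloop rest paragraphs current

def group_by_empty_split (segments : List String) : List (List String) :=
  pyAloop segments [] []

-- ===== PORT B =====
def pvKey (s : String) : Bool := PySem.Str.strip s != ""

-- append seg into the last run if its key matches, else start a new run (runs[-1] handling)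
def pushRun : List (Bool × List String) → Bool → String → List (Bool × List String)
  | [], k, seg => [(k, [seg])]
  | [(k1, g)], k, seg => if k1 == k then [(k1, g ++ [seg])] else [(k1, g), (k, [seg])]
  | r :: r2 :: rs, k, seg => r :: pushRun (r2 :: rs) k seg

def group_by_empty_split_alt (segments : List String) : List (List String) :=
  let runs := segments.foldl (fun runs seg => pushRun runs (pvKey seg) seg) []
  runs.filterMap (fun r => if r.1 then some r.2 else none)

-- ===== PRECONDITION & SPEC =====
def Spec_group_by_empty_split (segments : List String) (out : List (List String)) : Prop := out = group_by_empty_split_alt segments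
instance (segments : List String) (out : List (List String)) : Decidable (Spec_group_by_empty_split segments out) := by unfold Spec_group_by_empty_split; infer_instance

-- ===== CLAIM (what is proved, stated in full; the proofs are below) =====
def Claim_equal_group_by_empty_split : Prop := ∀ (segments : List String), Dom_group_by_empty_split segments → Spec_group_by_empty_split segments (group_by_empty_split segments)

-- ===== LEMMAS AND PROOFS =====

-- reference recursion: paragraphs emitted from a pending current group
def fSpec : List String → List String → List (List String)
  | cur, [] => if cur ≠ [] then [cur] else []
  | cur, seg :: rest =>
      if pvKey seg then fSpec (cur ++ [seg]) rest
      else if cur ≠ [] then cur :: fSpec [] rest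
      else fSpec [] rest

def emitRuns (runs : List (Bool × List String)) : List (List String) :=
  runs.filterMap (fun r => if r.1 then some r.2 else none)

lemma pyAloop_eq_fSpec (segs : List String) :
    ∀ ps cur, pyAloop segs ps cur = ps ++ fSpec cur segs := by
  induction segs with
  | nil => intro ps cur; by_cases h : cur = [] <;> simp [pyAloop, fSpec, h]
  | cons s rest ih =>
      intro ps cur
      by_cases hk : PySem.Str.strip s = ""
      · by_cases hc : cur = [] <;>
          simp [pyAloop, fSpec, pvKey, hk, hc, ih]
      · simp [pyAloop, fSpec, pvKey, hk, ih]

lemma pushRun_append (rs : List (Bool × List String)) (k1 : Bool) (g : List String)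
    (k : Bool) (s : String) :
    pushRun (rs ++ [(k1, g)]) k s =
      rs ++ (if k1 == k then [(k1, g ++ [s])] else [(k1, g), (k, [s])]) := by
  induction rs with
  | nil => simp [pushRun]
  | cons r rs ih =>
      cases rs with
      | nil => simp [pushRun]
      | cons r2 rs' => simp [pushRun] at ih ⊢; exact ih

-- the fold step
def stepB (runs : List (Bool × List String)) (seg : String) : List (Bool × List String) :=
  pushRun runs (pvKey seg) seg

-- main invariant: the fold from a state whose last run is (true,g) / (false,g) / absent
lemma foldB_inv (segs : List String) :
    (∀ rs g, g ≠ [] →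
        emitRuns (segs.foldl stepB (rs ++ [(true, g)])) = emitRuns rs ++ fSpec g segs) ∧
    (∀ rs g,
        emitRuns (segs.foldl stepB (rs ++ [(false, g)])) = emitRuns rs ++ fSpec [] segs) := by
  induction segs with
  | nil =>
      constructor
      · intro rs g hg; simp [emitRuns, fSpec, hg]
      · intro rs g; simp [emitRuns, fSpec]
  | cons s rest ih =>
      obtain ⟨ihT, ihF⟩ := ih
      constructor
      · intro rs g hg
        by_cases hk : pvKey s = true
        · have : stepB (rs ++ [(true, g)]) s = rs ++ [(true, g ++ [s])] := by
            simp [stepB, pushRun_append, hk]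
          simp only [List.foldl_cons, this]
          rw [ihT rs (g ++ [s]) (by simp)]
          simp [fSpec, hk]
        · have hk' : pvKey s = false := by simpa using hk
          have : stepB (rs ++ [(true, g)]) s = (rs ++ [(true, g)]) ++ [(false, [s])] := by
            simp [stepB, pushRun_append, hk']
          simp only [List.foldl_cons, this]
          rw [ihF (rs ++ [(true, g)]) [s]]
          simp [fSpec, hk', hg, emitRuns]
      · intro rs g
        by_cases hk : pvKey s = true
        · have : stepB (rs ++ [(false, g)]) s = (rs ++ [(false, g)]) ++ [(true, [s])] := by
            simp [stepB, pushRun_append, hk]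
          simp only [List.foldl_cons, this]
          rw [ihT (rs ++ [(false, g)]) [s] (by simp)]
          simp [fSpec, hk, emitRuns]
        · have hk' : pvKey s = false := by simpa using hk
          have : stepB (rs ++ [(false, g)]) s = rs ++ [(false, g ++ [s])] := by
            simp [stepB, pushRun_append, hk']
          simp only [List.foldl_cons, this]
          rw [ihF rs (g ++ [s])]
          simp [fSpec, hk']

lemma altB_eq_fSpec (segs : List String) :
    group_by_empty_split_alt segs = fSpec [] segs := by
  cases segs with
  | nil => simp [group_by_empty_split_alt, fSpec]
  | cons s rest =>
      show emitRuns ((s :: rest).foldl stepB []) = fSpec [] (s :: rest)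
      by_cases hk : pvKey s = true
      · have h0 : stepB [] s = [] ++ [(true, [s])] := by simp [stepB, pushRun, hk]
        simp only [List.foldl_cons, h0]
        rw [(foldB_inv rest).1 [] [s] (by simp)]
        simp [fSpec, hk, emitRuns]
      · have hk' : pvKey s = false := by simpa using hk
        have h0 : stepB [] s = [] ++ [(false, [s])] := by simp [stepB, pushRun, hk']
        simp only [List.foldl_cons, h0]
        rw [(foldB_inv rest).2 [] [s]]
        simp [fSpec, hk', emitRuns]

-- ===== VERDICT (by name: the statement is the Claim_ definition above) =====
theorem group_by_empty_split_spec : Claim_equal_group_by_empty_split := by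
  intro segments _
  show group_by_empty_split segments = group_by_empty_split_alt segments
  rw [group_by_empty_split, pyAloop_eq_fSpec, altB_eq_fSpec]
  simp
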